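-- pv_equiv track=rewrite | github.com/Dafydd8/TDI | ejercitacion segundo parcia/guia10.py | coincidencias
-- ===== SOURCE A (Python) =====
-- def coincidencias(xs):
--     if len(xs) == 0:
--         return 0
--     elif len(xs) == 1:
--         if xs[0] == 0:
--             return 1
--         else:
--             return 0
--     else:
--         if xs[len(xs)-1] == len(xs)-1:
--             return 1 + coincidencias(xs[:len(xs)-1])
--         else:
--             return coincidencias(xs[:len(xs)-1])
-- ===== SOURCE B (Python) =====
-- def coincidencias(xs):
--     return sum(1 for i, x in enumerate(xs) if x == i)
-- ===== Notes on version B (the rewrite author's own statement) =====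
-- stated objective: faster
-- what changed: Replaced the recursion that re-slices the list at every step with a single linear pass over enumerate counting positions where xs[i] == i.
import Mathlib
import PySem

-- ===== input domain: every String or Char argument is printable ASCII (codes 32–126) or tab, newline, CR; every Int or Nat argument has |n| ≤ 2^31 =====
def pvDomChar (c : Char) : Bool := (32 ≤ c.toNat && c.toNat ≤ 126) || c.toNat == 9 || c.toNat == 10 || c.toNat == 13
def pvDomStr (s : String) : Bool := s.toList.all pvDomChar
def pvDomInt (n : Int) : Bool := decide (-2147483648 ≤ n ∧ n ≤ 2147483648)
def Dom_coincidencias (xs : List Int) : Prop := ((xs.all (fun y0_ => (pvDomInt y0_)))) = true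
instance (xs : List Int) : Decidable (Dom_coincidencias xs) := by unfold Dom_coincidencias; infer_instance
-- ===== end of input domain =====

-- B replaces A's quadratic slice-and-recurse with one linear pass counting i with xs[i] == i.

-- ===== PORT A =====
def coincidencias (xs : List Int) : Int :=
  if xs.length = 0 then 0
  else if xs.length = 1 then
    if PySem.List.pyGetD xs 0 0 = 0 then 1 else 0
  else
    if PySem.List.pyGetD xs ((xs.length : Int) - 1) 0 = (xs.length : Int) - 1 then
      1 + coincidencias (PySem.List.slice xs none (some ((xs.length : Int) - 1)))
    else
      coincidencias (PySem.List.slice xs none (some ((xs.length : Int) - 1)))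
termination_by xs.length
decreasing_by
  all_goals
    have h1 : ((xs.length : Int) - 1) = ((xs.length - 1 : Nat) : Int) := by omega
    rw [h1, PySem.List.slice_to_natCast]
    simp [List.length_take]
    omega

-- ===== PORT B =====
def coincidencias_alt (xs : List Int) : Int :=
  (PySem.List.enumerate xs).foldl
    (fun acc p => if p.2 = p.1 then acc + 1 else acc) 0

-- ===== PRECONDITION & SPEC =====
def Spec_coincidencias (xs : List Int) (out : Int) : Prop := out = coincidencias_alt xs
instance (xs : List Int) (out : Int) : Decidable (Spec_coincidencias xs out) := by unfold Spec_coincidencias; infer_instance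

-- ===== CLAIM (what is proved, stated in full; the proofs are below) =====
def Claim_equal_coincidencias : Prop := ∀ (xs : List Int), Dom_coincidencias xs → Spec_coincidencias xs (coincidencias xs)

-- ===== LEMMAS AND PROOFS =====

theorem pv_foldl_shift (l : List (Int × Int)) (a : Int) :
    l.foldl (fun acc p => if p.2 = p.1 then acc + 1 else acc) a
      = a + l.foldl (fun acc p => if p.2 = p.1 then acc + 1 else acc) 0 := by
  induction l generalizing a with
  | nil => simp
  | cons h t ih =>
    simp only [List.foldl_cons]
    rw [ih, ih (if h.2 = h.1 then 0 + 1 else 0)]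
    split <;> ring

theorem pv_alt_append (xs : List Int) (x : Int) :
    coincidencias_alt (xs ++ [x])
      = coincidencias_alt xs + (if x = (xs.length : Int) then 1 else 0) := by
  unfold coincidencias_alt
  rw [PySem.List.enumerate_append, List.foldl_append]
  simp only [PySem.List.enumerate_cons, PySem.List.enumerate_nil, List.foldl_cons, List.foldl_nil]
  rw [pv_foldl_shift]
  norm_num
  split <;> simp

theorem pv_A_append (xs : List Int) (x : Int) :
    coincidencias (xs ++ [x])
      = (if x = (xs.length : Int) then 1 else 0) + coincidencias xs := by
  rw [coincidencias]
  cases xs with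
  | nil =>
    simp [coincidencias, PySem.List.pyGetD]
  | cons y ys =>
    have hlen : (y :: ys ++ [x]).length = ys.length + 2 := by simp
    have h0 : ¬ ((y :: ys ++ [x]).length = 0) := by omega
    have h1 : ¬ ((y :: ys ++ [x]).length = 1) := by omega
    simp only [h0, h1, if_false]
    have hcast : (((y :: ys ++ [x]).length : Int) - 1) = (((y :: ys).length : Nat) : Int) := by
      simp
    rw [hcast, PySem.List.slice_to_natCast]
    have htake : (y :: ys ++ [x]).take (y :: ys).length = y :: ys := by
      rw [show (y :: ys ++ [x]) = (y :: ys) ++ [x] by simp]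
      exact List.take_left
    have hget : PySem.List.pyGetD (y :: ys ++ [x]) (((y :: ys).length : Nat) : Int) 0 = x := by
      rw [PySem.List.pyGetD_natCast]
      rw [show (y :: ys ++ [x]) = (y :: ys) ++ [x] by simp]
      simp [List.getD]
    rw [htake, hget]
    split <;> simp_all

theorem pv_equal (xs : List Int) : coincidencias xs = coincidencias_alt xs := by
  induction xs using List.reverseRecOn with
  | nil => simp [coincidencias, coincidencias_alt, PySem.List.enumerate_nil]
  | append_singleton ys x ih =>
    rw [pv_A_append, pv_alt_append, ih]
    ring

-- ===== VERDICT (by name: the statement is the Claim_ definition above) =====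
theorem coincidencias_spec : Claim_equal_coincidencias := by
  intro xs _
  unfold Spec_coincidencias
  exact pv_equal xs
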